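-- pv_equiv track=rewrite | github.com/antorbus/lightlemur | src/tensor.py | is_stride_shape_compatible
-- ===== SOURCE A (Python) =====
-- def is_stride_shape_compatible(shape, stride):
--     if len(shape) != len(stride):
--         return False
--
--     if any(s < 0 for s in stride):
--         return False
--
--     if any(size > 0 and stride == 0 for size, stride in zip(shape, stride)):
--         return False
--
--     seen = set()
--     def check_overlap(dim, offset):
--         if dim == len(shape):
--             if offset in seen:
--                 return False
--             seen.add(offset)
--             return True
--
--         for i in range(shape[dim]):
--             if not check_overlap(dim + 1, offset + i * stride[dim]):
--                 return False
--         return True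
--     return check_overlap(0, 0)
-- ===== SOURCE B (Python) =====
-- def is_stride_shape_compatible(shape, stride):
--     if len(shape) != len(stride):
--         return False
--
--     if any(s < 0 for s in stride):
--         return False
--
--     if any(size > 0 and st == 0 for size, st in zip(shape, stride)):
--         return False
--
--     if any(size <= 0 for size in shape):
--         return True  # some axis is empty: no addressable offsets at all
--
--     # Breadth-first: expand the list of reachable offsets dimension by dimension;
--     # a collision among partial offsets already implies a full-offset collision
--     # (every remaining axis is non-empty), so test injectivity at each level.
--     offsets = [0]
--     for size, st in zip(shape, stride):
--         offsets = [o + i * st for o in offsets for i in range(size)]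
--         if len(set(offsets)) != len(offsets):
--             return False
--     return True
-- ===== Notes on version B (the rewrite author's own statement) =====
-- stated objective: alternative
-- what changed: The depth-first recursive check_overlap with its seen-set is replaced by a breadth-first comprehension that expands the list of all reachable offsets dimension by dimension, testing injectivity of each level with len(set(offsets)) == len(offsets) (sound because after an explicit empty-axis check every remaining axis is non-empty, so a partial-offset collision implies a full-offset collision); the three original guards are kept.
import Mathlib
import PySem

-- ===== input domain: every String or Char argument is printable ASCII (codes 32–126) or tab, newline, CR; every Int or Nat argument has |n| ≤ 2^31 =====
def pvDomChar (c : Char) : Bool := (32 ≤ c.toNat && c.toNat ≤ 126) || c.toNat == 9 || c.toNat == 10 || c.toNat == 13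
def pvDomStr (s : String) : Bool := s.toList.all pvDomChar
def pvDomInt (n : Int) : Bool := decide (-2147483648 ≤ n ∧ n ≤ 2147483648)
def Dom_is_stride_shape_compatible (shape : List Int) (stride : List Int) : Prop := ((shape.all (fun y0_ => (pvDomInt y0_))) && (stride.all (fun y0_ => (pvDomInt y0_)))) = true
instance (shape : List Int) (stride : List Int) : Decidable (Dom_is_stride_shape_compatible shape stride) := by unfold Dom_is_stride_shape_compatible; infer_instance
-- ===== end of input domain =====

-- B replaces A's depth-first recursive overlap check by a breadth-first expansion of all
-- reachable offsets followed by a single injectivity test (alternative decomposition, same cost).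

-- ===== PORT A =====
-- A's check_overlap reads shape[dim]/stride[dim] for dim < len(shape) with equal lengths,
-- so the suffix recursion over the zipped (size, stride) pairs visits exactly the same values.
mutual
  -- check_overlap(dim, offset) with the remaining (shape[dim:], stride[dim:]) pairs and the seen set
  def pvCheckOverlap : List (Int × Int) → Int → PySem.Set Int → Bool × PySem.Set Int
    | [], offset, seen =>
        if PySem.Set.contains seen offset then (false, seen)
        else (true, PySem.Set.add seen offset)
    | (sz, st) :: rest, offset, seen =>
        pvCheckFor (PySem.List.pyRange 0 sz 1) st rest offset seen
  termination_by l _ _ => (l.length, 1, 0)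
  -- the 'for i in range(shape[dim])' loop with early return False
  def pvCheckFor : List Int → Int → List (Int × Int) → Int → PySem.Set Int → Bool × PySem.Set Int
    | [], _, _, _, seen => (true, seen)
    | i :: is, st, rest, offset, seen =>
        match pvCheckOverlap rest (offset + i * st) seen with
        | (true, seen') => pvCheckFor is st rest offset seen'
        | (false, seen') => (false, seen')
  termination_by is _ rest _ _ => (rest.length + 1, 0, is.length)
end

def is_stride_shape_compatible (shape : List Int) (stride : List Int) : Bool :=
  if shape.length ≠ stride.length then false
  else if stride.any (fun s => decide (s < 0)) then false
  else if (shape.zip stride).any (fun p => decide (0 < p.1) && (p.2 == 0)) then false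
  else (pvCheckOverlap (shape.zip stride) 0 PySem.Set.empty).1

-- ===== PORT B =====
-- offsets = [o + i*st for o in offsets for i in range(size)]
def pvStep (offs : List Int) (p : Int × Int) : List Int :=
  offs.flatMap (fun o => (PySem.List.pyRange 0 p.1 1).map (fun i => o + i * p.2))

-- the level-by-level loop with the per-level injectivity test and early return False
def pvLoop : List (Int × Int) → List Int → Bool
  | [], _ => true
  | p :: rest, offsets =>
      let offsets' := pvStep offsets p
      if (PySem.Set.ofList offsets').length ≠ offsets'.length then false
      else pvLoop rest offsets'

def is_stride_shape_compatible_alt (shape : List Int) (stride : List Int) : Bool :=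
  if shape.length ≠ stride.length then false
  else if stride.any (fun s => decide (s < 0)) then false
  else if (shape.zip stride).any (fun p => decide (0 < p.1) && (p.2 == 0)) then false
  else if shape.any (fun s => decide (s ≤ 0)) then true
  else pvLoop (shape.zip stride) [0]

-- ===== PRECONDITION & SPEC =====
def Spec_is_stride_shape_compatible (shape : List Int) (stride : List Int) (out : Bool) : Prop := out = is_stride_shape_compatible_alt shape stride
instance (shape : List Int) (stride : List Int) (out : Bool) : Decidable (Spec_is_stride_shape_compatible shape stride out) := by unfold Spec_is_stride_shape_compatible; infer_instance

-- ===== CLAIM (what is proved, stated in full; the proofs are below) =====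
def Claim_equal_is_stride_shape_compatible : Prop := ∀ (shape : List Int) (stride : List Int), Dom_is_stride_shape_compatible shape stride → Spec_is_stride_shape_compatible shape stride (is_stride_shape_compatible shape stride)

-- ===== LEMMAS AND PROOFS =====

-- depth-first list of all offsets generated below a partial offset
def pvOffsets : List (Int × Int) → Int → List Int
  | [], o => [o]
  | (sz, st) :: rest, o =>
      (PySem.List.pyRange 0 sz 1).flatMap (fun i => pvOffsets rest (o + i * st))

-- sequential "insert each, fail on first duplicate" process
def pvFoldAdd : List Int → PySem.Set Int → Bool × PySem.Set Int
  | [], s => (true, s)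
  | x :: xs, s =>
      if PySem.Set.contains s x then (false, s) else pvFoldAdd xs (PySem.Set.add s x)

theorem pvFoldAdd_append (xs ys : List Int) (s : PySem.Set Int) :
    pvFoldAdd (xs ++ ys) s =
      match pvFoldAdd xs s with
      | (true, s') => pvFoldAdd ys s'
      | (false, s') => (false, s') := by
  induction xs generalizing s with
  | nil => simp [pvFoldAdd]
  | cons x xs ih =>
      simp only [List.cons_append, pvFoldAdd, PySem.Set.contains]
      by_cases hm : x ∈ s
      · simp [hm]
      · simp [hm, ih]

theorem pvCheckOverlap_eq_foldAdd (ps : List (Int × Int)) :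
    (∀ (o : Int) (seen : PySem.Set Int),
      pvCheckOverlap ps o seen = pvFoldAdd (pvOffsets ps o) seen) := by
  induction ps with
  | nil =>
      intro o seen
      simp [pvCheckOverlap, pvOffsets, pvFoldAdd, PySem.Set.contains]
  | cons p rest ih =>
      obtain ⟨sz, st⟩ := p
      intro o seen
      rw [pvCheckOverlap, pvOffsets]
      generalize PySem.List.pyRange 0 sz 1 = is
      induction is generalizing seen with
      | nil => simp [pvCheckFor, pvFoldAdd]
      | cons i is ih2 =>
          rw [pvCheckFor, List.flatMap_cons, pvFoldAdd_append, ih]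
          rcases h : pvFoldAdd (pvOffsets rest (o + i * st)) seen with ⟨b, s'⟩
          cases b
          · rfl
          · exact ih2 s'

theorem pvAdd_of_mem (s : PySem.Set Int) (x : Int) (hm : x ∈ s) :
    PySem.Set.add s x = s := by
  simp [PySem.Set.add, PySem.Set.contains, hm]

theorem pvAdd_of_not_mem (s : PySem.Set Int) (x : Int) (hm : x ∉ s) :
    PySem.Set.add s x = s ++ [x] := by
  simp [PySem.Set.add, PySem.Set.contains, hm]

theorem pvFoldAdd_fst (xs : List Int) (s : PySem.Set Int) :
    (pvFoldAdd xs s).1 = true ↔ xs.Nodup ∧ ∀ x ∈ xs, x ∉ s := by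
  induction xs generalizing s with
  | nil => simp [pvFoldAdd]
  | cons x xs ih =>
      simp only [pvFoldAdd, PySem.Set.contains]
      by_cases hm : x ∈ s
      · simp only [hm, List.contains_eq_mem, decide_true, if_true]
        constructor
        · intro hc; cases hc
        · rintro ⟨-, hall⟩
          exact absurd hm (hall x (by simp))
      · rw [if_neg (by simpa using hm), ih, pvAdd_of_not_mem s x hm]
        constructor
        · rintro ⟨hnd, hall⟩
          refine ⟨List.nodup_cons.mpr ⟨fun hx => by simpa using hall x hx, hnd⟩, ?_⟩
          intro y hy
          rcases List.mem_cons.mp hy with rfl | hy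
          · exact hm
          · intro hys
            exact hall y hy (by simp [hys])
        · rintro ⟨hnd, hall⟩
          rcases List.nodup_cons.mp hnd with ⟨hx, hnd2⟩
          refine ⟨hnd2, fun y hy => ?_⟩
          simp only [List.mem_append, List.mem_singleton]
          rintro (hys | rfl)
          · exact hall y (List.mem_cons_of_mem _ hy) hys
          · exact hx hy

theorem pvOfList_length (xs : List Int) (s : PySem.Set Int) :
    (xs.foldl PySem.Set.add s).length ≤ s.length + xs.length ∧
    ((xs.foldl PySem.Set.add s).length = s.length + xs.length ↔
      xs.Nodup ∧ ∀ x ∈ xs, x ∉ s) := by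
  induction xs generalizing s with
  | nil => simp
  | cons x xs ih =>
      simp only [List.foldl_cons, List.length_cons]
      by_cases hm : x ∈ s
      · rw [pvAdd_of_mem s x hm]
        have hle := (ih s).1
        refine ⟨by omega, ?_⟩
        constructor
        · intro he; omega
        · rintro ⟨-, hall⟩
          exact absurd hm (hall x (by simp))
      · rw [pvAdd_of_not_mem s x hm]
        obtain ⟨hle, hiff⟩ := ih (s ++ [x])
        rw [List.length_append, List.length_singleton] at hle hiff
        refine ⟨by omega, ?_⟩
        rw [show s.length + (xs.length + 1) = (s.length + 1) + xs.length by omega, hiff]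
        constructor
        · rintro ⟨hnd, hall⟩
          refine ⟨List.nodup_cons.mpr ⟨?_, hnd⟩, ?_⟩
          · intro hx
            exact hall x hx (by simp)
          · intro y hy
            rcases List.mem_cons.mp hy with rfl | hy
            · exact hm
            · intro hys
              exact hall y hy (by simp [hys])
        · rintro ⟨hnd, hall⟩
          rcases List.nodup_cons.mp hnd with ⟨hx, hnd2⟩
          refine ⟨hnd2, fun y hy => ?_⟩
          simp only [List.mem_append, List.mem_singleton]
          rintro (hys | rfl)
          · exact hall y (List.mem_cons_of_mem _ hy) hys
          · exact hx hy

theorem pvOfList_len_iff (xs : List Int) :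
    (PySem.Set.ofList xs).length = xs.length ↔ xs.Nodup := by
  have h := (pvOfList_length xs PySem.Set.empty).2
  have h0 : (PySem.Set.empty : PySem.Set Int).length = 0 := rfl
  rw [h0, Nat.zero_add] at h
  rw [show PySem.Set.ofList xs = List.foldl PySem.Set.add PySem.Set.empty xs from rfl, h]
  simp [PySem.Set.empty]

-- A's whole recursion decides Nodup of the depth-first offset list
theorem pvA_eq_nodup (ps : List (Int × Int)) :
    (pvCheckOverlap ps 0 PySem.Set.empty).1 = decide ((pvOffsets ps 0).Nodup) := by
  rw [pvCheckOverlap_eq_foldAdd]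
  apply Bool.eq_iff_iff.mpr
  rw [pvFoldAdd_fst, decide_eq_true_iff]
  constructor
  · rintro ⟨hnd, -⟩; exact hnd
  · intro hnd; exact ⟨hnd, fun x _ hx => by simp [PySem.Set.empty] at hx⟩

theorem pvOffsets_eq_nil_of_empty_axis (ps : List (Int × Int)) (q : Int × Int)
    (hq : q ∈ ps) (hsz : q.1 ≤ 0) : ∀ o, pvOffsets ps o = [] := by
  induction ps with
  | nil => cases hq
  | cons p rest ih =>
      intro o
      obtain ⟨sz, st⟩ := p
      rcases List.mem_cons.mp hq with rfl | hq'
      · have : PySem.List.pyRange 0 sz 1 = [] := by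
          rw [PySem.List.pyRange_one]
          simp at hsz ⊢
          omega
        simp [pvOffsets, this]
      · simp [pvOffsets, ih hq']

theorem pvOffsets_ne_nil (ps : List (Int × Int)) (hpos : ∀ q ∈ ps, 1 ≤ q.1) :
    ∀ o, pvOffsets ps o ≠ [] := by
  induction ps with
  | nil => intro o; simp [pvOffsets]
  | cons p rest ih =>
      intro o
      obtain ⟨sz, st⟩ := p
      have h0 : (0 : Int) ∈ PySem.List.pyRange 0 sz 1 := by
        rw [PySem.List.mem_pyRange_one]
        exact ⟨le_refl 0, by have := hpos (sz, st) (by simp); simpa using this⟩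
      simp only [pvOffsets, ne_eq, List.flatMap_eq_nil_iff]
      intro hall
      exact ih (fun q hq => hpos q (List.mem_cons_of_mem _ hq)) (o + 0 * st) (hall 0 h0)

-- a duplicate among partial offsets propagates to the flattened list when every block is non-empty
theorem pvDup_flatMap (os : List Int) (f : Int → List Int)
    (hne : ∀ o ∈ os, f o ≠ []) (hdup : ¬ os.Nodup) : ¬ (os.flatMap f).Nodup := by
  obtain ⟨x, hx⟩ := List.exists_duplicate_iff_not_nodup.mpr hdup
  have hxm : x ∈ os := hx.mem
  have hsub : List.Sublist [x, x] os := List.duplicate_iff_sublist.mp hx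
  have hsub2 : List.Sublist (f x ++ f x) (os.flatMap f) := by
    have := hsub.flatMap f
    simpa using this
  intro hnd
  have hnd2 := hnd.sublist hsub2
  rcases List.nodup_append.mp hnd2 with ⟨-, -, hdisj⟩
  obtain ⟨e, he⟩ := List.exists_mem_of_ne_nil _ (hne x hxm)
  exact hdisj e he e he rfl

theorem pvLoop_eq (ps : List (Int × Int)) (hpos : ∀ q ∈ ps, 1 ≤ q.1) :
    ∀ os : List Int, os.Nodup →
      pvLoop ps os = decide ((os.flatMap (fun o => pvOffsets ps o)).Nodup) := by
  induction ps with
  | nil =>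
      intro os hnd
      simp [pvLoop, pvOffsets, hnd]
  | cons p rest ih =>
      intro os hnd
      have hflat : os.flatMap (fun o => pvOffsets (p :: rest) o) =
          (pvStep os p).flatMap (fun o => pvOffsets rest o) := by
        obtain ⟨sz, st⟩ := p
        simp [pvStep, pvOffsets, List.flatMap_assoc, List.flatMap_map]
      rw [pvLoop, hflat]
      by_cases hdup : (pvStep os p).Nodup
      · rw [if_neg (fun hne => hne ((pvOfList_len_iff _).mpr hdup))]
        exact ih (fun q hq => hpos q (List.mem_cons_of_mem _ hq)) _ hdup
      · rw [if_pos (fun he => hdup ((pvOfList_len_iff _).mp he))]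
        have hne : ∀ o ∈ pvStep os p, pvOffsets rest o ≠ [] :=
          fun o _ => pvOffsets_ne_nil rest (fun q hq => hpos q (List.mem_cons_of_mem _ hq)) o
        have := pvDup_flatMap (pvStep os p) _ hne hdup
        simp [this]

-- ===== VERDICT (by name: the statement is the Claim_ definition above) =====
theorem is_stride_shape_compatible_spec : Claim_equal_is_stride_shape_compatible := by
  intro shape stride _
  unfold Spec_is_stride_shape_compatible is_stride_shape_compatible is_stride_shape_compatible_alt
  split_ifs with h1 h2 h3 h4
  · rfl
  · rfl
  · rfl
  · -- some axis is empty: A's offset list is [], A returns true; B returns true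
    rw [List.any_eq_true] at h4
    obtain ⟨s, hs, hle⟩ := h4
    have hlen : shape.length = stride.length := by omega
    obtain ⟨k, hk, hks⟩ := List.getElem_of_mem hs
    have hk2 : k < (shape.zip stride).length := by
      rw [List.length_zip]; omega
    have hfst : ((shape.zip stride)[k]'hk2).1 = s := by
      simp [List.getElem_zip, hks]
    rw [pvA_eq_nodup,
        pvOffsets_eq_nil_of_empty_axis (shape.zip stride) ((shape.zip stride)[k]'hk2)
          (List.getElem_mem hk2) (by rw [hfst]; simpa using hle) 0]
    simp
  · -- every axis is non-empty: both sides decide Nodup of the full offset list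
    have hpos : ∀ q ∈ shape.zip stride, 1 ≤ q.1 := by
      intro q hq
      obtain ⟨a, b⟩ := q
      rcases List.of_mem_zip hq with ⟨hq1, -⟩
      rw [Bool.not_eq_true, List.any_eq_false] at h4
      have := h4 a hq1
      show (1 : Int) ≤ a
      simp at this
      omega
    rw [pvA_eq_nodup, pvLoop_eq (shape.zip stride) hpos [0] (by simp)]
    simp
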